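-- pv_equiv track=rewrite | github.com/PavPavv/python-vs-js | src/index.py | getMaxLastIdx
-- ===== SOURCE A (Python) =====
-- def getMaxLastIdx(str,a,b):
--   maxAIdx = -1
--   maxBIdx = -1
--   for i in range(len(str)):
--     char = str[i]
--     if char == a:
--       maxAIdx = i
--     if char == b:
--       maxBIdx = i
--   if maxAIdx > maxBIdx:
--     return maxAIdx
--   elif maxAIdx < maxBIdx:
--     return maxBIdx
--   elif maxAIdx == maxBIdx:
--     return maxAIdx
-- ===== SOURCE B (Python) =====
-- def getMaxLastIdx(str, a, b):
--     for i in range(len(str) - 1, -1, -1):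
--         if str[i] == a or str[i] == b:
--             return i
--     return -1
-- ===== Notes on version B (the rewrite author's own statement) =====
-- stated objective: idiomatic
-- what changed: Replaced the full forward pass that tracks two running maxima with a reverse scan that returns the first (i.e. last) matching index immediately.
import Mathlib
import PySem

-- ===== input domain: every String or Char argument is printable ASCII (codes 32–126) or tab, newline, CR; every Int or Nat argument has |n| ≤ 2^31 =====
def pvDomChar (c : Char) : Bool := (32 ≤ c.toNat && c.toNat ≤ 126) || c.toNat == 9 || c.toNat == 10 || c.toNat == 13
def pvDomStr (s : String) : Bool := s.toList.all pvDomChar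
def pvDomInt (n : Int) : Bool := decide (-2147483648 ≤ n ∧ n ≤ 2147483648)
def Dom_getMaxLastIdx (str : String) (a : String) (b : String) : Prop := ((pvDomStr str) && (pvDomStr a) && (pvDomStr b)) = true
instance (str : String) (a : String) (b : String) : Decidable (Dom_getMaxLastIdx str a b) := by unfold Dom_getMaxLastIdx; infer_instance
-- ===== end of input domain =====

-- B replaces A's forward pass tracking two running maxima by a reverse scan that
-- returns the first matching index (idiomatic early return); return values proved equal.

-- ===== PORT A =====
-- forward loop over indices, maintaining maxAIdx and maxBIdx
def getMaxLastIdx (str : String) (a : String) (b : String) : Int :=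
  let p := (PySem.List.enumerate str.toList 0).foldl
    (fun (p : Int × Int) (ic : Int × Char) =>
      (if String.singleton ic.2 = a then ic.1 else p.1,
       if String.singleton ic.2 = b then ic.1 else p.2)) (-1, -1)
  if p.1 > p.2 then p.1
  else if p.1 < p.2 then p.2
  else p.1

-- ===== PORT B =====
-- reverse scan with early return (the recursion stops at the first match)
def revScan (a : String) (b : String) : List (Int × Char) → Int
  | [] => -1
  | (i, c) :: rest => if String.singleton c = a ∨ String.singleton c = b then i else revScan a b rest

def getMaxLastIdx_alt (str : String) (a : String) (b : String) : Int :=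
  revScan a b (PySem.List.enumerate str.toList 0).reverse

-- ===== PRECONDITION & SPEC =====
def Spec_getMaxLastIdx (str : String) (a : String) (b : String) (out : Int) : Prop := out = getMaxLastIdx_alt str a b
instance (str : String) (a : String) (b : String) (out : Int) : Decidable (Spec_getMaxLastIdx str a b out) := by unfold Spec_getMaxLastIdx; infer_instance

-- ===== CLAIM (what is proved, stated in full; the proofs are below) =====
def Claim_equal_getMaxLastIdx : Prop := ∀ (str : String) (a : String) (b : String), Dom_getMaxLastIdx str a b → Spec_getMaxLastIdx str a b (getMaxLastIdx str a b)

-- ===== LEMMAS AND PROOFS =====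

-- revScan with an explicit default, to generalize the induction
def revScanD (a : String) (b : String) (d : Int) : List (Int × Char) → Int
  | [] => d
  | (i, c) :: rest => if String.singleton c = a ∨ String.singleton c = b then i else revScanD a b d rest

theorem revScanD_neg_one (a b : String) (l : List (Int × Char)) :
    revScanD a b (-1) l = revScan a b l := by
  induction l with
  | nil => rfl
  | cons e rest ih => cases e with | mk i c => simp [revScanD, revScan, ih]

theorem revScanD_append_singleton (a b : String) (d : Int) (l : List (Int × Char)) (e : Int × Char) :
    revScanD a b d (l ++ [e]) =
      revScanD a b (if String.singleton e.2 = a ∨ String.singleton e.2 = b then e.1 else d) l := by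
  induction l with
  | nil => cases e with | mk i c => simp [revScanD]
  | cons f rest ih => cases f with | mk i c => simp [revScanD, ih]

-- the fold of A, over enumerate with start s, versus the reverse scan of B
theorem fold_max_eq_revScanD (a b : String) (cs : List Char) :
    ∀ (s x y : Int), x < s → y < s →
      (let p := (PySem.List.enumerate cs s).foldl
        (fun (p : Int × Int) (ic : Int × Char) =>
          (if String.singleton ic.2 = a then ic.1 else p.1,
           if String.singleton ic.2 = b then ic.1 else p.2)) (x, y)
       max p.1 p.2) = revScanD a b (max x y) ((PySem.List.enumerate cs s).reverse) := by
  induction cs with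
  | nil => intro s x y hx hy; simp [PySem.List.enumerate_nil, revScanD]
  | cons c rest ih =>
    intro s x y hx hy
    rw [PySem.List.enumerate_cons]
    simp only [List.foldl_cons, List.reverse_cons]
    rw [revScanD_append_singleton]
    have hx' : (if String.singleton c = a then s else x) < s + 1 := by split <;> omega
    have hy' : (if String.singleton c = b then s else y) < s + 1 := by split <;> omega
    have := ih (s + 1) (if String.singleton c = a then s else x)
      (if String.singleton c = b then s else y) hx' hy'
    simp only at this ⊢
    rw [this]
    congr 1
    by_cases ha : String.singleton c = a <;> by_cases hb : String.singleton c = b <;>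
      simp [ha, hb] <;> omega

-- A's final three-way comparison is just max
theorem final_if_eq_max (x y : Int) :
    (if x > y then x else if x < y then y else x) = max x y := by
  split_ifs <;> omega

-- ===== VERDICT (by name: the statement is the Claim_ definition above) =====
theorem getMaxLastIdx_spec : Claim_equal_getMaxLastIdx := by
  intro str a b _
  unfold Spec_getMaxLastIdx getMaxLastIdx getMaxLastIdx_alt
  simp only
  rw [final_if_eq_max]
  have h := fold_max_eq_revScanD a b str.toList 0 (-1) (-1) (by omega) (by omega)
  simp only at h
  rw [h]
  simp [revScanD_neg_one]
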